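-- pv_equiv track=rewrite | github.com/Redennison/CampusCollab | backend/main.py | validate_social_url
-- ===== SOURCE A (Python) =====
-- def validate_social_url(url: str, platform: str) -> bool:
--     """Validate social media URL format"""
--     if not url.strip():
--         return platform == 'twitter'  # Twitter is optional, others required
--
--     clean_url = url.strip().lower().replace('https://', '').replace('http://', '')
--
--     if platform == 'linkedin':
--         return (clean_url.startswith('linkedin.com/in/') or
--                 clean_url.startswith('www.linkedin.com/in/')) and len(clean_url.split('/')) >= 3
--
--     elif platform == 'github':
--         return (clean_url.startswith('github.com/') or
--                 clean_url.startswith('www.github.com/')) and len(clean_url.split('/')) >= 2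
--
--     elif platform == 'twitter':
--         return any(clean_url.startswith(domain + '/') for domain in
--                   ['x.com', 'www.x.com', 'twitter.com', 'www.twitter.com']) and len(clean_url.split('/')) >= 2
--
--     return False
-- ===== SOURCE B (Python) =====
-- # Structural re-implementation: instead of matching string prefixes, parse the
-- # URL once into '/'-separated segments, strip an optional 'www.' from the host
-- # segment, and compare host and path fields directly.
--
-- def validate_social_url(url: str, platform: str) -> bool:
--     """Validate social media URL format"""
--     if not url.strip():
--         return platform == 'twitter'  # Twitter is optional, others required
--
--     clean_url = url.strip().lower().replace('https://', '').replace('http://', '')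
--     segs = clean_url.split('/')
--     host = segs[0]
--     if host.startswith('www.'):
--         host = host[4:]
--
--     if platform == 'linkedin':
--         return host == 'linkedin.com' and len(segs) >= 3 and segs[1] == 'in'
--     if platform == 'github':
--         return host == 'github.com' and len(segs) >= 2
--     if platform == 'twitter':
--         return host in ('x.com', 'twitter.com') and len(segs) >= 2
--     return False
-- ===== Notes on version B (the rewrite author's own statement) =====
-- stated objective: alternative
-- what changed: Replaces A's per-prefix string matching (startswith against whole 'domain/path/' prefixes) by a single tokenize-then-compare pass: split the URL into '/' segments once, strip an optional 'www.' from the host segment, and compare host and path segments field by field.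
import Mathlib
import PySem

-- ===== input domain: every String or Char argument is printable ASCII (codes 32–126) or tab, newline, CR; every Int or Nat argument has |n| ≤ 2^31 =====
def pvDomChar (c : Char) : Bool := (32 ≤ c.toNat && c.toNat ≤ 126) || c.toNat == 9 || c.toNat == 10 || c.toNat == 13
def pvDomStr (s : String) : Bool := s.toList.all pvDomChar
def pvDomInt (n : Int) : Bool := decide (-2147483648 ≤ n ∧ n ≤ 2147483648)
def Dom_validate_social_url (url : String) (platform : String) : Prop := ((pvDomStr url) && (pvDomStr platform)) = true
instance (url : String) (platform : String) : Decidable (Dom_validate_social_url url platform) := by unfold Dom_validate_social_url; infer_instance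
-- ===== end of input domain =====

-- B replaces A's per-prefix startswith matching by one tokenize-then-compare pass:
-- split the URL into '/' segments once, strip an optional 'www.' from the host
-- segment, and compare host and path fields directly; same cost, different structure.

-- ===== PORT A =====
def validate_social_url (url : String) (platform : String) : Bool :=
  if PySem.Str.strip url = "" then platform == "twitter"
  else
    let clean_url := PySem.Str.replace (PySem.Str.replace (PySem.Str.lower (PySem.Str.strip url)) "https://" "") "http://" ""
    if platform == "linkedin" then
      (PySem.Str.startswith clean_url "linkedin.com/in/" ||
        PySem.Str.startswith clean_url "www.linkedin.com/in/") &&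
      decide (3 ≤ (List.splitOn '/' clean_url.toList).length)
    else if platform == "github" then
      (PySem.Str.startswith clean_url "github.com/" ||
        PySem.Str.startswith clean_url "www.github.com/") &&
      decide (2 ≤ (List.splitOn '/' clean_url.toList).length)
    else if platform == "twitter" then
      (["x.com", "www.x.com", "twitter.com", "www.twitter.com"].any
        (fun domain => PySem.Str.startswith clean_url (domain ++ "/"))) &&
      decide (2 ≤ (List.splitOn '/' clean_url.toList).length)
    else false

-- ===== PORT B =====
-- host.startswith('www.') → host[4:]  (removal of an optional 'www.' prefix)
def stripWWW (h : List Char) : List Char :=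
  if List.isPrefixOf "www.".toList h then h.drop 4 else h

def validate_social_url_alt (url : String) (platform : String) : Bool :=
  if PySem.Str.strip url = "" then platform == "twitter"
  else
    let clean_url := PySem.Str.replace (PySem.Str.replace (PySem.Str.lower (PySem.Str.strip url)) "https://" "") "http://" ""
    let segs := List.splitOn '/' clean_url.toList
    let host := stripWWW segs.headI
    if platform == "linkedin" then
      host == "linkedin.com".toList && decide (3 ≤ segs.length) &&
        (segs.getD 1 [] == "in".toList)
    else if platform == "github" then
      host == "github.com".toList && decide (2 ≤ segs.length)
    else if platform == "twitter" then
      (host == "x.com".toList || host == "twitter.com".toList) &&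
        decide (2 ≤ segs.length)
    else false

-- ===== PRECONDITION & SPEC =====
def Spec_validate_social_url (url : String) (platform : String) (out : Bool) : Prop := out = validate_social_url_alt url platform
instance (url : String) (platform : String) (out : Bool) : Decidable (Spec_validate_social_url url platform out) := by unfold Spec_validate_social_url; infer_instance

-- ===== CLAIM =====
def Claim_equal_validate_social_url : Prop := ∀ (url : String) (platform : String), Dom_validate_social_url url platform → Spec_validate_social_url url platform (validate_social_url url platform)

-- ===== LEMMAS AND PROOFS =====

theorem splitOn_slash_first (p t : List Char) (hp : '/' ∉ p) :
    List.splitOn '/' (p ++ '/' :: t) = p :: List.splitOn '/' t := by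
  rw [List.splitOn, List.splitOn,
    List.splitOnP_first (p := fun x => x == '/') (xs := p)
      (fun x hx => by simp [ne_of_mem_of_not_mem hx hp]) '/' (by simp) t]

theorem prefix1_iff_split (p l : List Char) (hp : '/' ∉ p) :
    p ++ ['/'] <+: l ↔
      ((List.splitOn '/' l).headI = p ∧ 2 ≤ (List.splitOn '/' l).length) := by
  constructor
  · rintro ⟨t, rfl⟩
    have h1 : ((p ++ ['/']) ++ t) = p ++ '/' :: t := by simp
    rw [h1, splitOn_slash_first p t hp]
    refine ⟨rfl, ?_⟩
    have := List.splitOnP_ne_nil (fun x => x == '/') t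
    have : 0 < (List.splitOn '/' t).length := List.length_pos_iff.mpr this
    simp; omega
  · rintro ⟨hh, hl⟩
    have hrec := List.intercalate_splitOn (xs := l) '/'
    rcases hs : List.splitOn '/' l with _ | ⟨a, rest⟩
    · exact absurd hs (by rw [List.splitOn]; exact List.splitOnP_ne_nil _ _)
    · rcases rest with _ | ⟨b, rest'⟩
      · rw [hs] at hl; simp at hl
      · rw [hs] at hh hrec
        simp at hh
        rw [show ['/'].intercalate (a :: b :: rest') = a ++ '/' :: ['/'].intercalate (b :: rest') by
          simp [List.intercalate, List.intersperse]] at hrec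
        rw [← hh]
        exact ⟨['/'].intercalate (b :: rest'), by rw [← hrec]; simp⟩

theorem prefix2_iff_split (p l : List Char) (hp : '/' ∉ p) :
    p ++ '/' :: 'i' :: 'n' :: '/' :: [] <+: l ↔
      ((List.splitOn '/' l).headI = p ∧ (List.splitOn '/' l).getD 1 [] = ['i', 'n'] ∧
        3 ≤ (List.splitOn '/' l).length) := by
  constructor
  · rintro ⟨t, rfl⟩
    have h1 : ((p ++ '/' :: 'i' :: 'n' :: '/' :: []) ++ t) = p ++ '/' :: (['i', 'n'] ++ '/' :: t) := by simp
    rw [h1, splitOn_slash_first p _ hp, splitOn_slash_first ['i', 'n'] t (by decide)]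
    have := List.splitOnP_ne_nil (fun x => x == '/') t
    have : 0 < (List.splitOn '/' t).length := List.length_pos_iff.mpr this
    refine ⟨rfl, rfl, by simp; omega⟩
  · rintro ⟨hh, h1, hl⟩
    have hrec := List.intercalate_splitOn (xs := l) '/'
    rcases hs : List.splitOn '/' l with _ | ⟨a, rest⟩
    · exact absurd hs (by rw [List.splitOn]; exact List.splitOnP_ne_nil _ _)
    · rcases rest with _ | ⟨b, rest'⟩
      · rw [hs] at hl; simp at hl
      · rcases rest' with _ | ⟨c, rest''⟩
        · rw [hs] at hl; simp at hl
        · rw [hs] at hh h1 hrec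
          simp at hh h1
          rw [show ['/'].intercalate (a :: b :: c :: rest'') =
              a ++ '/' :: (b ++ '/' :: ['/'].intercalate (c :: rest'')) by
            simp [List.intercalate, List.intersperse]] at hrec
          rw [hh, h1] at hrec
          exact ⟨['/'].intercalate (c :: rest''), by rw [← hrec]; simp⟩

theorem stripWWW_eq (h target : List Char) (hw : List.isPrefixOf "www.".toList target = false) :
    stripWWW h = target ↔ (h = target ∨ h = "www.".toList ++ target) := by
  unfold stripWWW
  by_cases hp : List.isPrefixOf "www.".toList h
  · rw [if_pos hp]
    rw [List.isPrefixOf_iff_prefix] at hp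
    obtain ⟨t, ht⟩ := hp
    constructor
    · intro hd
      right
      rw [← ht]
      have : t = target := by rw [← ht] at hd; simpa using hd
      simp [this]
    · rintro (rfl | he)
      · have hpre : "www.".toList <+: h := ⟨t, ht⟩
        rw [← List.isPrefixOf_iff_prefix] at hpre
        rw [hw] at hpre; exact absurd hpre (by simp)
      · simp [he]
  · rw [if_neg hp]
    constructor
    · exact Or.inl
    · rintro (rfl | rfl)
      · rfl
      · exact absurd (by rw [List.isPrefixOf_iff_prefix]; exact ⟨target, rfl⟩) hp


theorem linkedin_case (clean : String) :
    ((PySem.Str.startswith clean "linkedin.com/in/" ||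
        PySem.Str.startswith clean "www.linkedin.com/in/") &&
      decide (3 ≤ (List.splitOn '/' clean.toList).length)) =
    (stripWWW (List.splitOn '/' clean.toList).headI == "linkedin.com".toList &&
      decide (3 ≤ (List.splitOn '/' clean.toList).length) &&
      ((List.splitOn '/' clean.toList).getD 1 [] == "in".toList)) := by
  rw [Bool.eq_iff_iff]
  simp only [Bool.and_eq_true, Bool.or_eq_true, decide_eq_true_iff, beq_iff_eq,
    PySem.Str.startswith_eq, PySem.Chars.startswith_iff]
  rw [show "linkedin.com/in/".toList = "linkedin.com".toList ++ '/' :: 'i' :: 'n' :: '/' :: [] by decide,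
    show "www.linkedin.com/in/".toList = "www.linkedin.com".toList ++ '/' :: 'i' :: 'n' :: '/' :: [] by decide,
    prefix2_iff_split _ _ (by decide), prefix2_iff_split _ _ (by decide),
    stripWWW_eq _ _ (by decide),
    show "www.".toList ++ "linkedin.com".toList = "www.linkedin.com".toList by decide,
    show "in".toList = ['i','n'] by decide]
  tauto

theorem github_case (clean : String) :
    ((PySem.Str.startswith clean "github.com/" ||
        PySem.Str.startswith clean "www.github.com/") &&
      decide (2 ≤ (List.splitOn '/' clean.toList).length)) =
    (stripWWW (List.splitOn '/' clean.toList).headI == "github.com".toList &&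
      decide (2 ≤ (List.splitOn '/' clean.toList).length)) := by
  rw [Bool.eq_iff_iff]
  simp only [Bool.and_eq_true, Bool.or_eq_true, decide_eq_true_iff, beq_iff_eq,
    PySem.Str.startswith_eq, PySem.Chars.startswith_iff]
  rw [show "github.com/".toList = "github.com".toList ++ ['/'] by decide,
    show "www.github.com/".toList = "www.github.com".toList ++ ['/'] by decide,
    prefix1_iff_split _ _ (by decide), prefix1_iff_split _ _ (by decide),
    stripWWW_eq _ _ (by decide),
    show "www.".toList ++ "github.com".toList = "www.github.com".toList by decide]
  tauto

theorem twitter_case (clean : String) :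
    ((["x.com", "www.x.com", "twitter.com", "www.twitter.com"].any
        (fun domain => PySem.Str.startswith clean (domain ++ "/"))) &&
      decide (2 ≤ (List.splitOn '/' clean.toList).length)) =
    ((stripWWW (List.splitOn '/' clean.toList).headI == "x.com".toList ||
        stripWWW (List.splitOn '/' clean.toList).headI == "twitter.com".toList) &&
      decide (2 ≤ (List.splitOn '/' clean.toList).length)) := by
  rw [Bool.eq_iff_iff]
  simp only [List.any_cons, List.any_nil, Bool.and_eq_true, Bool.or_eq_true,
    Bool.false_eq_true, or_false, decide_eq_true_iff, beq_iff_eq,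
    PySem.Str.startswith_eq, PySem.Chars.startswith_iff]
  rw [show ("x.com" ++ "/" : String).toList = "x.com".toList ++ ['/'] by decide,
    show ("www.x.com" ++ "/" : String).toList = "www.x.com".toList ++ ['/'] by decide,
    show ("twitter.com" ++ "/" : String).toList = "twitter.com".toList ++ ['/'] by decide,
    show ("www.twitter.com" ++ "/" : String).toList = "www.twitter.com".toList ++ ['/'] by decide,
    prefix1_iff_split _ _ (by decide), prefix1_iff_split _ _ (by decide),
    prefix1_iff_split _ _ (by decide), prefix1_iff_split _ _ (by decide),
    stripWWW_eq _ _ (by decide), stripWWW_eq _ _ (by decide),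
    show "www.".toList ++ "x.com".toList = "www.x.com".toList by decide,
    show "www.".toList ++ "twitter.com".toList = "www.twitter.com".toList by decide]
  tauto

-- ===== VERDICT =====
theorem validate_social_url_spec : Claim_equal_validate_social_url := by
  intro url platform _
  unfold Spec_validate_social_url validate_social_url validate_social_url_alt
  by_cases hs : PySem.Str.strip url = ""
  · rw [if_pos hs, if_pos hs]
  · rw [if_neg hs, if_neg hs]
    simp only []
    by_cases h1 : (platform == "linkedin") = true
    · rw [if_pos h1, if_pos h1]
      exact linkedin_case _
    · rw [if_neg h1, if_neg h1]
      by_cases h2 : (platform == "github") = true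
      · rw [if_pos h2, if_pos h2]
        exact github_case _
      · rw [if_neg h2, if_neg h2]
        by_cases h3 : (platform == "twitter") = true
        · rw [if_pos h3, if_pos h3]
          exact twitter_case _
        · rw [if_neg h3, if_neg h3]
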